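-- pv_equiv track=rewrite | github.com/korsNaike/cripto-matan | lab2.py | calculate_residues_with_steps
-- ===== SOURCE A (Python) =====
-- def calculate_residues_with_steps(p):
--     """Вычисляет квадратичные вычеты по модулю p и возвращает шаги вычислений."""
--     residues = set()
--     steps = []
--     for x in range(1, p):
--         square = x ** 2
--         mod = square % p
--         steps.append(f"x = {x}: {x}² mod {p} = {square} mod {p} = {mod}")
--         residues.add(mod)
--     return sorted(residues), steps
-- ===== SOURCE B (Python) =====
-- def calculate_residues_with_steps(p):
--     """Квадратичные вычеты по модулю p и шаги вычислений (половинный проход по симметрии x² ≡ (p-x)²)."""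
--     steps = [f"x = {x}: {x}\u00b2 mod {p} = {x ** 2} mod {p} = {x ** 2 % p}" for x in range(1, p)]
--     residues = {x * x % p for x in range(1, p // 2 + 1)}
--     return sorted(residues), steps
-- ===== Notes on version B (the rewrite author's own statement) =====
-- stated objective: alternative
-- what changed: The residue set is computed by a separate half-range pass using the symmetry x^2 = (p-x)^2 (mod p), and the steps list by a plain comprehension, instead of one loop accumulating both.
import Mathlib
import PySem

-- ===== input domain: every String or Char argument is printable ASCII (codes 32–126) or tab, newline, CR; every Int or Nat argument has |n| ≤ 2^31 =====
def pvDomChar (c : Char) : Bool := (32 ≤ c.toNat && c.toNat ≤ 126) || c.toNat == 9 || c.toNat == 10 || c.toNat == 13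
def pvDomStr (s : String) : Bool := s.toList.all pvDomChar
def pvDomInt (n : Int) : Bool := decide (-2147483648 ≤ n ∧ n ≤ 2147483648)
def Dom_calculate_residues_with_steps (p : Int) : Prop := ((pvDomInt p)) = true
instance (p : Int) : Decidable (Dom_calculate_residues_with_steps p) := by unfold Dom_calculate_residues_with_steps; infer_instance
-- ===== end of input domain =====

-- B computes the residue set by a separate half-range pass (symmetry x² ≡ (p−x)² mod p) and the
-- steps list by a plain comprehension, instead of A's single loop accumulating both; same cost.

-- ===== PORT A =====
def calculate_residues_with_steps (p : Int) : List Int × List String :=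
  let st := (PySem.List.pyRange 1 p 1).foldl
    (fun (acc : PySem.Set Int × List String) x =>
      let square := x ^ 2
      let m := PySem.Int.mod square p
      (PySem.Set.add acc.1 m,
       acc.2 ++ ["x = " ++ PySem.Int.toStr x ++ ": " ++ PySem.Int.toStr x ++ "² mod " ++
                 PySem.Int.toStr p ++ " = " ++ PySem.Int.toStr square ++ " mod " ++
                 PySem.Int.toStr p ++ " = " ++ PySem.Int.toStr m]))
    (PySem.Set.empty, [])
  (PySem.List.sorted st.1 (fun r => r) false, st.2)

-- ===== PORT B =====
def calculate_residues_with_steps_alt (p : Int) : List Int × List String :=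
  let steps := (PySem.List.pyRange 1 p 1).map (fun x =>
    "x = " ++ PySem.Int.toStr x ++ ": " ++ PySem.Int.toStr x ++ "² mod " ++
    PySem.Int.toStr p ++ " = " ++ PySem.Int.toStr (x ^ 2) ++ " mod " ++
    PySem.Int.toStr p ++ " = " ++ PySem.Int.toStr (PySem.Int.mod (x ^ 2) p))
  let residues : PySem.Set Int :=
    PySem.Set.ofList ((PySem.List.pyRange 1 (PySem.Int.floordiv p 2 + 1) 1).map
      (fun x => PySem.Int.mod (x * x) p))
  (PySem.List.sorted residues (fun r => r) false, steps)

-- ===== PRECONDITION & SPEC =====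
def Spec_calculate_residues_with_steps (p : Int) (out : List Int × List String) : Prop := out = calculate_residues_with_steps_alt p
instance (p : Int) (out : List Int × List String) : Decidable (Spec_calculate_residues_with_steps p out) := by unfold Spec_calculate_residues_with_steps; infer_instance

-- ===== CLAIM (what is proved, stated in full; the proofs are below) =====
def Claim_equal_calculate_residues_with_steps : Prop := ∀ (p : Int), Dom_calculate_residues_with_steps p → Spec_calculate_residues_with_steps p (calculate_residues_with_steps p)

-- ===== LEMMAS AND PROOFS =====

-- symmetry of squares mod p
lemma pv_sq_mod_sym (p x : Int) (hp : 0 < p) :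
    PySem.Int.mod ((p - x) * (p - x)) p = PySem.Int.mod (x * x) p := by
  rw [PySem.Int.mod_eq_emod_of_pos hp, PySem.Int.mod_eq_emod_of_pos hp]
  have h : (p - x) * (p - x) = x * x + p * (p - 2 * x) := by ring
  rw [h, Int.add_mul_emod_self_left]

-- the full-range and half-range passes produce the same residue values
lemma pv_mem_iff (p a : Int) (hp : 2 ≤ p) :
    (a ∈ (PySem.List.pyRange 1 p 1).map (fun x => PySem.Int.mod (x * x) p) ↔
     a ∈ (PySem.List.pyRange 1 (PySem.Int.floordiv p 2 + 1) 1).map (fun x => PySem.Int.mod (x * x) p)) := by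
  have hp0 : (0 : Int) < p := by omega
  rw [PySem.Int.floordiv_eq_ediv_of_pos (show (0:Int) < 2 by omega)]
  simp only [List.mem_map, PySem.List.mem_pyRange_one]
  constructor
  · rintro ⟨x, ⟨h1, h2⟩, rfl⟩
    by_cases hx : x ≤ p / 2
    · exact ⟨x, ⟨h1, by omega⟩, rfl⟩
    · refine ⟨p - x, ⟨by omega, by omega⟩, ?_⟩
      exact pv_sq_mod_sym p x hp0
  · rintro ⟨x, ⟨h1, h2⟩, rfl⟩
    exact ⟨x, ⟨h1, by omega⟩, rfl⟩

-- ===== VERDICT (by name: the statement is the Claim_ definition above) =====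
theorem calculate_residues_with_steps_spec : Claim_equal_calculate_residues_with_steps := by
  intro p _
  unfold Spec_calculate_residues_with_steps
  unfold calculate_residues_with_steps calculate_residues_with_steps_alt
  by_cases hp : p ≤ 1
  · rw [PySem.List.pyRange_one_eq_nil hp,
        PySem.List.pyRange_one_eq_nil (by
          rw [PySem.Int.floordiv_eq_ediv_of_pos (show (0:Int) < 2 by omega)]; omega)]
    simp [PySem.Set.ofList, PySem.Set.empty]
  · have hp2 : 2 ≤ p := by omega
    rw [PySem.List.foldl_prod_mk
      (f := fun (s : PySem.Set Int) x => PySem.Set.add s (PySem.Int.mod (x ^ 2) p))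
      (g := fun (s : List String) x =>
        s ++ ["x = " ++ PySem.Int.toStr x ++ ": " ++ PySem.Int.toStr x ++ "² mod " ++
              PySem.Int.toStr p ++ " = " ++ PySem.Int.toStr (x ^ 2) ++ " mod " ++
              PySem.Int.toStr p ++ " = " ++ PySem.Int.toStr (PySem.Int.mod (x ^ 2) p)])]
    refine Prod.ext ?_ ?_
    · -- residues component
      show PySem.List.sorted
          ((PySem.List.pyRange 1 p 1).foldl
            (fun s x => PySem.Set.add s (PySem.Int.mod (x ^ 2) p)) PySem.Set.empty)
          (fun r => r) false = _
      have hfold : (PySem.List.pyRange 1 p 1).foldl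
          (fun s x => PySem.Set.add s (PySem.Int.mod (x ^ 2) p)) PySem.Set.empty
          = PySem.Set.ofList ((PySem.List.pyRange 1 p 1).map (fun x => PySem.Int.mod (x * x) p)) := by
        rw [PySem.Set.ofList_eq_foldl, List.foldl_map]
        congr 1
        funext s x
        rw [sq x]
      rw [hfold]
      apply PySem.List.sorted_eq_sorted_of_perm _ _ _ (fun a b h => h)
      apply List.perm_of_nodup_nodup_toFinset_eq (PySem.Set.nodup_ofList _) (PySem.Set.nodup_ofList _)
      ext a
      simp only [List.mem_toFinset, PySem.Set.mem_ofList]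
      exact pv_mem_iff p a hp2
    · -- steps component
      show (PySem.List.pyRange 1 p 1).foldl _ [] = _
      rw [PySem.List.foldl_append_singleton_eq_map]
      simp
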